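-- pv_equiv track=rewrite | github.com/ashbyp/pscratch | algorithms/m/kaitenzushi.py | getMaximumEatenDishCount
-- ===== SOURCE A (Python) =====
-- from typing import List
--
-- def getMaximumEatenDishCount(N: int, D: List[int], K: int) -> int:
--     eaten = {}
--     count = 0
--     for x in D:
--         if x not in eaten:
--
--             eaten[x] = count
--             count += 1
--         else:
--             last = eaten[x]
--             if (count - last) > K:
--
--                 eaten[x] = count
--                 count += 1
--     return count
-- ===== SOURCE B (Python) =====
-- from collections import deque
-- from typing import List
--
-- def getMaximumEatenDishCount(N: int, D: List[int], K: int) -> int: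
--     window = deque()
--     recent = set()
--     count = 0
--     for x in D:
--         if x not in recent:
--             count += 1
--             window.append(x)
--             recent.add(x)
--             if len(window) > K:
--                 recent.discard(window.popleft())
--     return count
-- ===== Notes on version B (the rewrite author's own statement) =====
-- stated objective: idiomatic
-- what changed: Replaces A's dict of absolute eat-positions with an explicit bounded sliding window (deque of the last K eaten dishes plus a membership set) that actively evicts the oldest dish.
import Mathlib
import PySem

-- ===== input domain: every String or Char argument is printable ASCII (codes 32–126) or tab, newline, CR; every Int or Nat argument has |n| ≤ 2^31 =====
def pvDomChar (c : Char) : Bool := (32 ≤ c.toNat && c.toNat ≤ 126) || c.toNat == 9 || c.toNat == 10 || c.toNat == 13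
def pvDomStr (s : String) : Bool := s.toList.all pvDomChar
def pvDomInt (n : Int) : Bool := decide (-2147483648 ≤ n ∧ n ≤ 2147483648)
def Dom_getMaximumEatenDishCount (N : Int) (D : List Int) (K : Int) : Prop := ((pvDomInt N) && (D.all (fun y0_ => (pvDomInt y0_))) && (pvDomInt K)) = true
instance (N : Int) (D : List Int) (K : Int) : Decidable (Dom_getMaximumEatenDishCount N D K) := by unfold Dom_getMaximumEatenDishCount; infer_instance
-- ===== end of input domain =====

-- B keeps an explicit sliding window (deque of the last K eaten dishes + a membership set)
-- instead of A's dict of absolute eat-positions; same return value, proved equivalent.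

-- ===== PORT A =====
-- one iteration of A's loop body (state: the dict `eaten` and the counter)
def stepA (K : Int) (s : PySem.Dict Int Int × Int) (x : Int) : PySem.Dict Int Int × Int :=
  match s.1.get? x with
  | none => (s.1.insert x s.2, s.2 + 1)
  | some last => if s.2 - last > K then (s.1.insert x s.2, s.2 + 1) else s

def getMaximumEatenDishCount (N : Int) (D : List Int) (K : Int) : Int :=
  (D.foldl (stepA K) (PySem.Dict.empty, 0)).2

-- ===== PORT B =====
-- one iteration of B's loop body (state: window deque, membership set, counter)
def stepB (K : Int) (s : List Int × PySem.Set Int × Int) (x : Int) : List Int × PySem.Set Int × Int :=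
  if PySem.Set.contains s.2.1 x then s
  else
    let w := s.1 ++ [x]
    let r := PySem.Set.add s.2.1 x
    if ((w.length : Int) > K) then (w.tail, PySem.Set.discard r (w.headD 0), s.2.2 + 1)
    else (w, r, s.2.2 + 1)

def getMaximumEatenDishCount_alt (N : Int) (D : List Int) (K : Int) : Int :=
  (D.foldl (stepB K) ([], PySem.Set.empty, 0)).2.2

-- ===== PRECONDITION & SPEC =====
def Spec_getMaximumEatenDishCount (N : Int) (D : List Int) (K : Int) (out : Int) : Prop := out = getMaximumEatenDishCount_alt N D K
instance (N : Int) (D : List Int) (K : Int) (out : Int) : Decidable (Spec_getMaximumEatenDishCount N D K out) := by unfold Spec_getMaximumEatenDishCount; infer_instance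

-- ===== CLAIM (what is proved, stated in full; the proofs are below) =====
def Claim_equal_getMaximumEatenDishCount : Prop := ∀ (N : Int) (D : List Int) (K : Int), Dom_getMaximumEatenDishCount N D K → Spec_getMaximumEatenDishCount N D K (getMaximumEatenDishCount N D K)

-- ===== LEMMAS AND PROOFS =====

-- The coupling invariant between A's state (dict `e` of absolute eat-positions, counter `c`)
-- and B's state (window `w`, membership set `r`, same counter): the window holds exactly the
-- keys whose stored position is in [c - max K 0, c), in increasing position order.
def WInv (K : Int) (e : PySem.Dict Int Int) (c : Int) (w : List Int) (r : PySem.Set Int) : Prop :=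
  0 ≤ c ∧
  (∀ y, y ∈ r ↔ y ∈ w) ∧
  w.Nodup ∧
  ((w.length : Int) = min (max K 0) c) ∧
  (∀ i (h : i < w.length), e.get? w[i] = some (c - (w.length : Int) + i)) ∧
  (∀ y v, e.get? y = some v → 0 ≤ v) ∧
  (∀ y, y ∉ w → ∀ v, e.get? y = some v → v < c - max K 0)

lemma inv_init (K : Int) : WInv K PySem.Dict.empty 0 [] PySem.Set.empty := by
  refine ⟨le_refl 0, ?_, List.nodup_nil, by simp, ?_, ?_, ?_⟩ <;>
    simp [PySem.Set.empty, PySem.Dict.get?_empty]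

lemma step_inv (K : Int) (e : PySem.Dict Int Int) (c : Int) (w : List Int) (r : PySem.Set Int) (x : Int) (h : WInv K e c w r) :
    WInv K (stepA K (e, c) x).1 (stepA K (e, c) x).2
      (stepB K (w, r, c) x).1 (stepB K (w, r, c) x).2.1 ∧
    (stepA K (e, c) x).2 = (stepB K (w, r, c) x).2.2 := by
  obtain ⟨hc, hmem, hnd, hlen, hpos, hnn, hout⟩ := h
  by_cases hx : x ∈ w
  · -- x is in the window: both sides skip
    have hrx : PySem.Set.contains r x = true := by
      rw [PySem.Set.contains_iff, hmem]; exact hx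
    obtain ⟨i, hi, hwi⟩ := List.getElem_of_mem hx
    have hgx : e.get? x = some (c - (w.length : Int) + i) := by
      rw [← hwi]; exact hpos i hi
    have hK : ¬ (c - (c - (w.length : Int) + i) > K) := by
      have h1 : (w.length : Int) ≤ max K 0 := by omega
      have h2 : (i : Int) < (w.length : Int) := by exact_mod_cast hi
      omega
    simp only [stepA, stepB, hrx, if_true, hgx, hK, if_false]
    exact ⟨⟨hc, hmem, hnd, hlen, hpos, hnn, hout⟩, trivial⟩
  · -- x is not in the window: both sides eat
    have hrx : PySem.Set.contains r x = false := by
      rw [Bool.eq_false_iff, Ne, PySem.Set.contains_iff, hmem]; exact hx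
    have hA : stepA K (e, c) x = (e.insert x c, c + 1) := by
      simp only [stepA]
      cases hg : e.get? x with
      | none => rfl
      | some v =>
        have hv := hout x hx v hg
        have : c - v > K := by
          have : max K 0 ≥ K := le_max_left _ _
          omega
        simp [this]
    rw [hA]
    simp only [stepB, hrx]
    by_cases hpop : ((w.length + 1 : Nat) : Int) > K
    · -- eviction branch
      have hlen' : ((w ++ [x]).length : Nat) = w.length + 1 := by simp
      have hlenK : (w.length : Int) = max K 0 := by omega
      simp only [Bool.false_eq_true, if_false, hlen', if_pos (by exact_mod_cast hpop)]
      cases w with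
      | nil =>
        -- window was empty (max K 0 = 0): x is appended then immediately evicted
        simp only [List.nil_append, List.tail_cons, List.headD_cons]
        have hK0 : max K 0 = 0 := by simpa using hlenK.symm
        refine ⟨⟨by omega, ?_, List.nodup_nil, by simp; omega, ?_, ?_, ?_⟩, trivial⟩
        · intro y
          have := hmem y
          simp only [PySem.Set.mem_discard, PySem.Set.mem_add, List.not_mem_nil, iff_false] at *
          tauto
        · intro i hi; simp at hi
        · intro y v hg
          rcases eq_or_ne y x with rfl | hne
          · rw [PySem.Dict.get?_insert_self] at hg
            injection hg with hg; omega
          · rw [PySem.Dict.get?_insert_of_ne e c hne] at hg; exact hnn y v hg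
        · intro y _ v hg
          rcases eq_or_ne y x with rfl | hne
          · rw [PySem.Dict.get?_insert_self] at hg
            injection hg with hg; omega
          · rw [PySem.Dict.get?_insert_of_ne e c hne] at hg
            have := hout y (by simp) v hg; omega
      | cons hd t =>
        -- evict the head hd, append x
        simp only [List.cons_append, List.tail_cons, List.headD_cons]
        have hndt : t.Nodup := (List.nodup_cons.mp hnd).2
        have hhd : hd ∉ t := (List.nodup_cons.mp hnd).1
        have hxhd : x ≠ hd := fun hxe => hx (hxe ▸ List.mem_cons_self ..)
        have hxt : x ∉ t := fun hxe => hx (List.mem_cons_of_mem _ hxe)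
        have hlent : ((t ++ [x]).length : Int) = ((hd :: t).length : Int) := by simp
        refine ⟨⟨by omega, ?_, ?_, by rw [hlent]; omega, ?_, ?_, ?_⟩, trivial⟩
        · intro y
          simp only [PySem.Set.mem_discard, PySem.Set.mem_add, hmem,
            List.mem_append, List.mem_cons, List.not_mem_nil, or_false]
          constructor
          · rintro ⟨hy | rfl, hne⟩
            · rcases hy with rfl | hy
              · exact absurd rfl hne
              · exact Or.inl hy
            · exact Or.inr rfl
          · rintro (hy | rfl)
            · exact ⟨Or.inl (Or.inr hy), fun he => hhd (he ▸ hy)⟩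
            · exact ⟨Or.inr rfl, hxhd⟩
        · exact List.Nodup.append hndt (List.nodup_singleton x)
            (by simpa [List.disjoint_singleton] using hxt)
        · intro i hi
          simp only [List.length_append, List.length_singleton] at hi
          rcases lt_or_eq_of_le (Nat.lt_succ_iff.mp hi) with hilt | hieq
          · have hget : (t ++ [x])[i]'(by simp; omega) = (hd :: t)[i + 1]'(by simp; omega) := by
              rw [List.getElem_append_left hilt]; simp
            have hne : (t ++ [x])[i]'(by simp; omega) ≠ x := by
              rw [List.getElem_append_left hilt]
              intro he; exact hxt (he ▸ List.getElem_mem hilt)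
            rw [PySem.Dict.get?_insert_of_ne e c hne, hget]
            have := hpos (i + 1) (by simpa using Nat.succ_lt_succ hilt)
            rw [this]; congr 1
            simp only [List.length_cons, List.length_append, List.length_nil]
            push_cast; ring
          · subst hieq
            have hget : (t ++ [x])[t.length]'(by simp) = x := by simp
            rw [hget, PySem.Dict.get?_insert_self]
            congr 1
            simp only [List.length_append, List.length_cons, List.length_nil]
            push_cast; ring
        · intro y v hg
          rcases eq_or_ne y x with rfl | hne
          · rw [PySem.Dict.get?_insert_self] at hg
            injection hg with hg; omega
          · rw [PySem.Dict.get?_insert_of_ne e c hne] at hg; exact hnn y v hg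
        · intro y hy v hg
          have hyx : y ≠ x := fun he => hy (by simp [he])
          rw [PySem.Dict.get?_insert_of_ne e c hyx] at hg
          rcases eq_or_ne y hd with rfl | hyhd
          · have := hpos 0 (by simp)
            simp only [List.getElem_cons_zero] at this
            rw [this] at hg; injection hg with hg
            simp only [List.length_cons] at hg hlenK
            omega
          · have hyw : y ∉ hd :: t := by
              intro hyw
              rcases List.mem_cons.mp hyw with rfl | hyt
              · exact hyhd rfl
              · exact hy (by simp [hyt])
            have := hout y hyw v hg; omega
    · -- no eviction: window still growing (c < K)
      have hlen' : ((w ++ [x]).length : Nat) = w.length + 1 := by simp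
      simp only [Bool.false_eq_true, if_false, hlen', if_neg (by exact_mod_cast hpop)]
      have hcK : (w.length : Int) = c := by
        have : max K 0 ≥ K := le_max_left _ _
        omega
      refine ⟨⟨by omega, ?_, ?_, by simp only [List.length_append, List.length_singleton]; omega, ?_, ?_, ?_⟩, trivial⟩
      · intro y
        simp only [PySem.Set.mem_add, hmem, List.mem_append, List.mem_singleton]
      · exact List.Nodup.append hnd (List.nodup_singleton x)
          (by simpa [List.disjoint_singleton] using hx)
      · intro i hi
        simp only [List.length_append, List.length_singleton] at hi
        rcases lt_or_eq_of_le (Nat.lt_succ_iff.mp hi) with hilt | hieq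
        · have hne : (w ++ [x])[i]'(by simp; omega) ≠ x := by
            rw [List.getElem_append_left hilt]
            intro he; exact hx (he ▸ List.getElem_mem hilt)
          rw [PySem.Dict.get?_insert_of_ne e c hne, List.getElem_append_left hilt]
          rw [hpos i hilt]; congr 1
          simp only [List.length_append, List.length_singleton]
          push_cast; ring
        · subst hieq
          have hget : (w ++ [x])[w.length]'(by simp) = x := by simp
          rw [hget, PySem.Dict.get?_insert_self]
          congr 1
          simp only [List.length_append, List.length_singleton]
          push_cast; ring
      · intro y v hg
        rcases eq_or_ne y x with rfl | hne
        · rw [PySem.Dict.get?_insert_self] at hg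
          injection hg with hg; omega
        · rw [PySem.Dict.get?_insert_of_ne e c hne] at hg; exact hnn y v hg
      · intro y hy v hg
        have hyx : y ≠ x := fun he => hy (by simp [he])
        rw [PySem.Dict.get?_insert_of_ne e c hyx] at hg
        have := hout y (fun hyw => hy (by simp [hyw])) v hg
        omega

lemma fold_eq (K : Int) : ∀ (D : List Int) e c w r, WInv K e c w r →
    (D.foldl (stepA K) (e, c)).2 = (D.foldl (stepB K) (w, r, c)).2.2
  | [], e, c, w, r, _ => rfl
  | x :: D, e, c, w, r, h => by
    obtain ⟨hinv, hcnt⟩ := step_inv K e c w r x h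
    simp only [List.foldl_cons]
    have hA : stepA K (e, c) x = ((stepA K (e, c) x).1, (stepA K (e, c) x).2) := rfl
    have hB : stepB K (w, r, c) x =
        ((stepB K (w, r, c) x).1, (stepB K (w, r, c) x).2.1, (stepB K (w, r, c) x).2.2) := rfl
    rw [hA, hB, ← hcnt]
    exact fold_eq K D _ _ _ _ hinv

-- ===== VERDICT (by name: the statement is the Claim_ definition above) =====
theorem getMaximumEatenDishCount_spec : Claim_equal_getMaximumEatenDishCount := by
  intro N D K _
  unfold Spec_getMaximumEatenDishCount getMaximumEatenDishCount getMaximumEatenDishCount_alt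
  exact fold_eq K D _ _ _ _ (inv_init K)
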